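-- pv_equiv track=rewrite | github.com/sunmuchao/ai_incubation_platform | ai_incubation_platform/ai-code-understanding/src/services/code_navigation_service.py | _get_symbol_at_position
-- ===== SOURCE A (Python) =====
-- from typing import Any, Dict, List, Optional, Set, Tuple
--
-- def _get_symbol_at_position(
--
--     content: str,
--     line: int,
--     column: int,
--     language: str
-- ) -> Optional[str]:
--     """获取指定位置的符号名称"""
--     lines = content.split('\n')
--     if line < 1 or line > len(lines):
--         return None
--
--     target_line = lines[line - 1]
--     if column < 1 or column > len(target_line) + 1:
--         return None
--
--     # 提取符号名称（字母数字和下划线）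
--     char = target_line[column - 1] if column <= len(target_line) else ''
--     if not (char.isalnum() or char == '_'):
--         return None
--
--     # 向左右扩展获取完整符号名
--     left = column - 1
--     right = column
--
--     while left > 0 and (target_line[left - 1].isalnum() or target_line[left - 1] == '_'):
--         left -= 1
--     while right < len(target_line) and (target_line[right].isalnum() or target_line[right] == '_'):
--         right += 1
--
--     return target_line[left:right]
-- ===== SOURCE B (Python) =====
-- def _get_symbol_at_position(content, line, column, language):
--     lines = content.split('\n')
--     if line < 1 or line > len(lines):
--         return None
--     target_line = lines[line - 1]
--     if column < 1 or column > len(target_line) + 1: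
--         return None
--     idx = column - 1
--     # tokenize the line once into identifier spans, then locate the span containing idx
--     spans = []
--     start = None
--     for i, ch in enumerate(target_line):
--         if ch.isalnum() or ch == '_':
--             if start is None:
--                 start = i
--         else:
--             if start is not None:
--                 spans.append((start, i))
--                 start = None
--     if start is not None:
--         spans.append((start, len(target_line)))
--     for s, e in spans:
--         if s <= idx < e:
--             return target_line[s:e]
--     return None
-- ===== Notes on version B (the rewrite author's own statement) =====
-- stated objective: alternative
-- what changed: B replaces A's point-wise left/right while-loop expansion around the cursor with a single tokenize pass that groups consecutive identifier characters into (start, end) spans and then returns the span containing column-1, if any.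
import Mathlib
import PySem

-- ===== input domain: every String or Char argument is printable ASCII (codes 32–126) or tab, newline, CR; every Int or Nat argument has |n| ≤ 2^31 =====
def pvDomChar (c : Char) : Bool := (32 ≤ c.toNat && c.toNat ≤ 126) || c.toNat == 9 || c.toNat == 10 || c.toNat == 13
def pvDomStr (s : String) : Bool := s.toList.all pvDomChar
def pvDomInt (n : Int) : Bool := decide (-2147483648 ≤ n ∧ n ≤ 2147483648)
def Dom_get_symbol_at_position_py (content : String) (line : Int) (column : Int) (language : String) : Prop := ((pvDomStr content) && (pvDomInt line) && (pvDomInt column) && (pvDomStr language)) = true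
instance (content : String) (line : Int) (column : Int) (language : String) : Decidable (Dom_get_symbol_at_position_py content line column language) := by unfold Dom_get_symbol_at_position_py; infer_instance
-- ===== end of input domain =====

-- B replaces A's point-wise left/right while-loop expansion around the cursor by a single
-- tokenize pass (grouping consecutive identifier characters into spans) followed by a lookup
-- of the span containing the cursor index; objective: alternative decomposition, same cost.

-- identifier-character predicate shared by both sources: c.isalnum() or c == '_'
def pvIdent (c : Char) : Bool := PySem.Chars.isalnum c || c == '_'

-- ===== PORT A =====
-- while left > 0 and ident(target[left-1]): left -= 1
def pvLeftLoop (t : List Char) (l : Nat) : Nat :=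
  if h : 0 < l ∧ pvIdent (t.getD (l - 1) ' ') then pvLeftLoop t (l - 1) else l
termination_by l
decreasing_by omega

-- while right < len(target) and ident(target[right]): right += 1
def pvRightLoop (t : List Char) (r : Nat) : Nat :=
  if h : r < t.length ∧ pvIdent (t.getD r ' ') then pvRightLoop t (r + 1) else r
termination_by t.length - r
decreasing_by omega

def pvACore (t : List Char) (column : Int) : Option String :=
  -- char = target[column-1] if column <= len else ''; '' is not an identifier char
  let charOk := if column ≤ (t.length : Int) then pvIdent (t.getD (column - 1).toNat ' ') else false
  if !charOk then none
  else
    let left := pvLeftLoop t (column - 1).toNat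
    let right := pvRightLoop t column.toNat
    some (String.ofList (PySem.List.slice t (some (left : Int)) (some (right : Int))))

def get_symbol_at_position_py (content : String) (line : Int) (column : Int) (language : String) : Option String :=
  let lines := PySem.Chars.splitOn content.toList ['\n']
  if line < 1 ∨ line > (lines.length : Int) then none
  else
    let target := PySem.List.pyGetD lines (line - 1) []
    if column < 1 ∨ column > (target.length : Int) + 1 then none
    else pvACore target column

-- ===== PORT B =====
-- one step of the tokenizing for-loop: state = (spans so far, start of the open run or none)
def pvTokStep (st : List (Int × Int) × Option Int) (ic : Int × Char) : List (Int × Int) × Option Int :=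
  if pvIdent ic.2 then
    match st.2 with
    | none => (st.1, some ic.1)
    | some s => (st.1, some s)
  else
    match st.2 with
    | none => (st.1, none)
    | some s => (st.1 ++ [(s, ic.1)], none)

def pvTokens (t : List Char) : List (Int × Int) :=
  let st := (PySem.List.enumerate t 0).foldl pvTokStep ([], none)
  match st.2 with
  | none => st.1
  | some s => st.1 ++ [(s, (t.length : Int))]

def pvFindSpan (idx : Int) : List (Int × Int) → Option (Int × Int)
  | [] => none
  | se :: rest => if se.1 ≤ idx ∧ idx < se.2 then some se else pvFindSpan idx rest

def pvBCore (t : List Char) (column : Int) : Option String :=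
  let idx := column - 1
  match pvFindSpan idx (pvTokens t) with
  | some se => some (String.ofList (PySem.List.slice t (some se.1) (some se.2)))
  | none => none

def get_symbol_at_position_py_alt (content : String) (line : Int) (column : Int) (language : String) : Option String :=
  let lines := PySem.Chars.splitOn content.toList ['\n']
  if line < 1 ∨ line > (lines.length : Int) then none
  else
    let target := PySem.List.pyGetD lines (line - 1) []
    if column < 1 ∨ column > (target.length : Int) + 1 then none
    else pvBCore target column

-- ===== PRECONDITION & SPEC =====
def Spec_get_symbol_at_position_py (content : String) (line : Int) (column : Int) (language : String) (out : Option String) : Prop := out = get_symbol_at_position_py_alt content line column language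
instance (content : String) (line : Int) (column : Int) (language : String) (out : Option String) : Decidable (Spec_get_symbol_at_position_py content line column language out) := by unfold Spec_get_symbol_at_position_py; infer_instance

-- ===== CLAIM (what is proved, stated in full; the proofs are below) =====
def Claim_equal_get_symbol_at_position_py : Prop := ∀ (content : String) (line : Int) (column : Int) (language : String), Dom_get_symbol_at_position_py content line column language → Spec_get_symbol_at_position_py content line column language (get_symbol_at_position_py content line column language)

-- ===== LEMMAS AND PROOFS =====

-- `pvP t i` = "the character at index i of t is an identifier character"
def pvP (t : List Char) (i : Nat) : Bool := pvIdent (t.getD i ' ')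

-- invariant of the tokenizing fold after the first k characters have been processed
def pvInv (t : List Char) (k : Nat) (st : List (Int × Int) × Option Int) : Prop :=
  (∀ se ∈ st.1, ∃ s e : Nat, se = ((s : Int), (e : Int)) ∧ s < e ∧ e < k ∧
      (∀ i, s ≤ i → i < e → pvP t i = true) ∧ (s = 0 ∨ pvP t (s - 1) = false) ∧ pvP t e = false) ∧
  (∀ i, i < k → pvP t i = true →
      (∃ se ∈ st.1, se.1 ≤ (i : Int) ∧ (i : Int) < se.2) ∨ (∃ s : Nat, st.2 = some (s : Int) ∧ s ≤ i)) ∧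
  (∀ sI, st.2 = some sI → ∃ s : Nat, sI = (s : Int) ∧ s < k ∧
      (∀ i, s ≤ i → i < k → pvP t i = true) ∧ (s = 0 ∨ pvP t (s - 1) = false))

lemma pvInv_step (t : List Char) (k : Nat) (st : List (Int × Int) × Option Int)
    (hk : k < t.length) (h : pvInv t k st) :
    pvInv t (k + 1) (pvTokStep st ((k : Int), t.getD k ' ')) := by
  obtain ⟨sp0, os⟩ := st
  obtain ⟨hsp, hcov, hstart⟩ := h
  simp only at hsp hcov hstart
  by_cases hp : pvIdent (t.getD k ' ') = true
  · have hpk : pvP t k = true := hp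
    cases os with
    | none =>
      -- run starts at k: new state (sp0, some k)
      have hnb : k = 0 ∨ pvP t (k - 1) = false := by
        rcases Nat.eq_zero_or_pos k with h0 | h0
        · exact Or.inl h0
        · right
          by_cases hq : pvP t (k - 1) = true
          · rcases hcov (k - 1) (by omega) hq with ⟨se, hmem, _, hlt⟩ | ⟨s, hs, _⟩
            · obtain ⟨s, e, hse, _, hek, _, _, _⟩ := hsp se hmem
              rw [hse] at hlt
              simp only at hlt
              have : k - 1 < e := by exact_mod_cast hlt
              omega
            · cases hs
          · simpa using hq
      refine ⟨?_, ?_, ?_⟩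
      · intro se hse
        simp only [pvTokStep, if_pos hp] at hse
        obtain ⟨s, e, h1, h2, h3, h4, h5, h6⟩ := hsp se hse
        exact ⟨s, e, h1, h2, by omega, h4, h5, h6⟩
      · intro i hi hpi
        simp only [pvTokStep, if_pos hp]
        rcases Nat.lt_or_ge i k with hik | hik
        · rcases hcov i hik hpi with hA | ⟨s, hs, _⟩
          · exact Or.inl hA
          · cases hs
        · have : i = k := by omega
          subst this
          exact Or.inr ⟨i, rfl, Nat.le_refl i⟩
      · intro sI hsI
        simp only [pvTokStep, if_pos hp] at hsI
        cases hsI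
        refine ⟨k, rfl, by omega, ?_, hnb⟩
        intro i h1 h2
        have : i = k := by omega
        subst this; exact hpk
    | some s0 =>
      obtain ⟨s, hs0, hsk, hall, hlb⟩ := hstart s0 rfl
      refine ⟨?_, ?_, ?_⟩
      · intro se hse
        simp only [pvTokStep, if_pos hp] at hse
        obtain ⟨s', e', h1, h2, h3, h4, h5, h6⟩ := hsp se hse
        exact ⟨s', e', h1, h2, by omega, h4, h5, h6⟩
      · intro i hi hpi
        simp only [pvTokStep, if_pos hp]
        rcases Nat.lt_or_ge i k with hik | hik
        · rcases hcov i hik hpi with hA | ⟨s', hs', hsi⟩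
          · exact Or.inl hA
          · cases hs'
            exact Or.inr ⟨s', rfl, hsi⟩
        · have : i = k := by omega
          subst this
          rw [hs0]
          exact Or.inr ⟨s, rfl, by omega⟩
      · intro sI hsI
        simp only [pvTokStep, if_pos hp] at hsI
        cases hsI
        rw [hs0]
        refine ⟨s, rfl, by omega, ?_, hlb⟩
        intro i h1 h2
        rcases Nat.lt_or_ge i k with hik | hik
        · exact hall i h1 hik
        · have : i = k := by omega
          subst this; exact hpk
  · have hpk : pvP t k = false := by simpa [pvP] using hp
    cases os with
    | none =>
      refine ⟨?_, ?_, ?_⟩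
      · intro se hse
        simp only [pvTokStep, if_neg hp] at hse
        obtain ⟨s', e', h1, h2, h3, h4, h5, h6⟩ := hsp se hse
        exact ⟨s', e', h1, h2, by omega, h4, h5, h6⟩
      · intro i hi hpi
        simp only [pvTokStep, if_neg hp]
        rcases Nat.lt_or_ge i k with hik | hik
        · rcases hcov i hik hpi with hA | ⟨s', hs', _⟩
          · exact Or.inl hA
          · cases hs'
        · have : i = k := by omega
          subst this
          rw [hpk] at hpi; cases hpi
      · intro sI hsI
        simp only [pvTokStep, if_neg hp] at hsI
        cases hsI
    | some s0 =>
      obtain ⟨s, hs0, hsk, hall, hlb⟩ := hstart s0 rfl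
      refine ⟨?_, ?_, ?_⟩
      · intro se hse
        simp only [pvTokStep, if_neg hp] at hse
        rcases List.mem_append.mp hse with hm | hm
        · obtain ⟨s', e', h1, h2, h3, h4, h5, h6⟩ := hsp se hm
          exact ⟨s', e', h1, h2, by omega, h4, h5, h6⟩
        · have : se = (s0, (k : Int)) := List.mem_singleton.mp hm
          subst this
          rw [hs0]
          exact ⟨s, k, rfl, hsk, by omega, hall, hlb, hpk⟩
      · intro i hi hpi
        simp only [pvTokStep, if_neg hp]
        rcases Nat.lt_or_ge i k with hik | hik
        · rcases hcov i hik hpi with ⟨se, hmem, hc1, hc2⟩ | ⟨s', hs', hsi⟩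
          · exact Or.inl ⟨se, List.mem_append.mpr (Or.inl hmem), hc1, hc2⟩
          · cases hs'
            left
            refine ⟨((s' : Int), (k : Int)), List.mem_append.mpr (Or.inr (List.mem_singleton.mpr rfl)), ?_, ?_⟩
            · simpa using hsi
            · simpa using hik
        · have : i = k := by omega
          subst this
          rw [hpk] at hpi; cases hpi
      · intro sI hsI
        simp only [pvTokStep, if_neg hp] at hsI
        cases hsI

lemma pvInv_fold (t : List Char) : ∀ (u : List Char) (k : Nat) (st : List (Int × Int) × Option Int),
    t.drop k = u → k ≤ t.length → pvInv t k st →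
    pvInv t t.length ((PySem.List.enumerate u (k : Int)).foldl pvTokStep st) := by
  intro u
  induction u with
  | nil =>
    intro k st hd hk h
    have : t.length ≤ k := by
      have := congrArg List.length hd
      simp at this
      omega
    have hkl : k = t.length := by omega
    subst hkl
    simpa [PySem.List.enumerate_nil] using h
  | cons c u' ih =>
    intro k st hd hk h
    have hklt : k < t.length := by
      have := congrArg List.length hd
      simp at this
      omega
    have hc : t.getD k ' ' = c := by
      have h0 : (t.drop k)[0]? = some c := by rw [hd]; rfl
      rw [List.getElem?_drop] at h0
      simp only [Nat.add_zero] at h0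
      rw [List.getD_eq_getElem?_getD, h0]
      rfl
    have hd' : t.drop (k + 1) = u' := by
      have : (t.drop k).tail = t.drop (k + 1) := by
        rw [← List.drop_drop]
        simp
      rw [← this, hd]
      rfl

    rw [PySem.List.enumerate_cons, List.foldl_cons]
    have hstep := pvInv_step t k st hklt h
    rw [hc] at hstep
    have := ih (k + 1) (pvTokStep st ((k : Int), c)) hd' (by omega) hstep
    simpa [Int.add_comm] using this

-- the tokens of t: each is a well-formed maximal identifier run, and together they cover
-- every identifier character
lemma pvTokens_spec (t : List Char) :
    (∀ se ∈ pvTokens t, ∃ s e : Nat, se = ((s : Int), (e : Int)) ∧ s < e ∧ e ≤ t.length ∧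
        (∀ i, s ≤ i → i < e → pvP t i = true) ∧ (s = 0 ∨ pvP t (s - 1) = false) ∧
        (e = t.length ∨ pvP t e = false)) ∧
    (∀ i, i < t.length → pvP t i = true →
        ∃ se ∈ pvTokens t, se.1 ≤ (i : Int) ∧ (i : Int) < se.2) := by
  have h0 : pvInv t 0 ([], none) := by
    refine ⟨by simp, by intro i hi; omega, by intro sI h; cases h⟩
  have hf := pvInv_fold t t 0 ([], none) (by simp) (by omega) h0
  simp only [Nat.cast_zero] at hf
  unfold pvTokens
  set st := (PySem.List.enumerate t 0).foldl pvTokStep ([], none) with hst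
  obtain ⟨hsp, hcov, hstart⟩ := hf
  cases hos : st.2 with
  | none =>
    simp only [hos]
    constructor
    · intro se hse
      obtain ⟨s, e, h1, h2, h3, h4, h5, h6⟩ := hsp se hse
      exact ⟨s, e, h1, h2, by omega, h4, h5, Or.inr h6⟩
    · intro i hi hpi
      rcases hcov i hi hpi with hA | ⟨s, hs, _⟩
      · exact hA
      · rw [hos] at hs; cases hs
  | some s0 =>
    obtain ⟨s, hs0, hsk, hall, hlb⟩ := hstart s0 hos
    simp only [hos]
    constructor
    · intro se hse
      rcases List.mem_append.mp hse with hm | hm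
      · obtain ⟨s', e', h1, h2, h3, h4, h5, h6⟩ := hsp se hm
        exact ⟨s', e', h1, h2, by omega, h4, h5, Or.inr h6⟩
      · have : se = (s0, (t.length : Int)) := List.mem_singleton.mp hm
        subst this
        rw [hs0]
        exact ⟨s, t.length, rfl, hsk, Nat.le_refl _, hall, hlb, Or.inl rfl⟩
    · intro i hi hpi
      rcases hcov i hi hpi with ⟨se, hm, hc1, hc2⟩ | ⟨s', hs', hsi⟩
      · exact ⟨se, List.mem_append.mpr (Or.inl hm), hc1, hc2⟩
      · rw [hos] at hs'
        have hs0' : s0 = (s' : Int) := by injection hs'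
        refine ⟨(s0, (t.length : Int)), List.mem_append.mpr (Or.inr (List.mem_singleton.mpr rfl)), ?_, ?_⟩
        · rw [hs0']; simpa using hsi
        · simpa using hi

lemma pvFindSpan_some (idx : Int) (sp : List (Int × Int)) (se : Int × Int)
    (h : pvFindSpan idx sp = some se) : se ∈ sp ∧ se.1 ≤ idx ∧ idx < se.2 := by
  induction sp with
  | nil => simp [pvFindSpan] at h
  | cons a rest ih =>
    rw [pvFindSpan] at h
    split_ifs at h with hc
    · cases h; exact ⟨List.mem_cons_self, hc.1, hc.2⟩
    · obtain ⟨hm, h1, h2⟩ := ih h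
      exact ⟨List.mem_cons_of_mem _ hm, h1, h2⟩

lemma pvFindSpan_isSome (idx : Int) (sp : List (Int × Int)) (se : Int × Int)
    (hmem : se ∈ sp) (h1 : se.1 ≤ idx) (h2 : idx < se.2) : (pvFindSpan idx sp).isSome := by
  induction sp with
  | nil => simp at hmem
  | cons a rest ih =>
    rw [pvFindSpan]
    split_ifs with hc
    · rfl
    · rcases List.mem_cons.mp hmem with h | h
      · subst h; exact absurd ⟨h1, h2⟩ hc
      · exact ih h

lemma pvLeftLoop_le (t : List Char) (l : Nat) : pvLeftLoop t l ≤ l := by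
  induction l using Nat.strong_induction_on with
  | _ l ih =>
    rw [pvLeftLoop]
    split_ifs with h
    · have := ih (l - 1) (by omega); omega
    · exact Nat.le_refl l

lemma pvLeftLoop_all (t : List Char) (l : Nat) :
    ∀ i, pvLeftLoop t l ≤ i → i < l → pvP t i = true := by
  induction l using Nat.strong_induction_on with
  | _ l ih =>
    intro i hi1 hi2
    rw [pvLeftLoop] at hi1
    split_ifs at hi1 with h
    · rcases Nat.lt_or_ge i (l - 1) with hlt | hge
      · exact ih (l - 1) (by omega) i hi1 hlt
      · have : i = l - 1 := by omega
        subst this; exact h.2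
    · omega

lemma pvLeftLoop_boundary (t : List Char) (l : Nat) :
    pvLeftLoop t l = 0 ∨ pvP t (pvLeftLoop t l - 1) = false := by
  induction l using Nat.strong_induction_on with
  | _ l ih =>
    rw [pvLeftLoop]
    split_ifs with h
    · exact ih (l - 1) (by omega)
    · rcases Nat.eq_zero_or_pos l with h0 | h0
      · exact Or.inl h0
      · right
        have : ¬ pvIdent (t.getD (l - 1) ' ') = true := fun hc => h ⟨h0, hc⟩
        simpa [pvP] using this

lemma pvRightLoop_aux (t : List Char) : ∀ (m r : Nat), t.length - r ≤ m →
    (r ≤ pvRightLoop t r ∧ (r ≤ t.length → pvRightLoop t r ≤ t.length) ∧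
     (∀ i, r ≤ i → i < pvRightLoop t r → pvP t i = true) ∧
     (r ≤ t.length → pvRightLoop t r = t.length ∨ pvP t (pvRightLoop t r) = false)) := by
  intro m
  induction m with
  | zero =>
    intro r hm
    have hr : ¬ (r < t.length ∧ pvIdent (t.getD r ' ') = true) := fun hc => by omega
    rw [pvRightLoop, dif_neg hr]
    refine ⟨Nat.le_refl r, fun h => h, fun i h1 h2 => by omega, fun h => ?_⟩
    rcases Nat.lt_or_ge r t.length with hlt | hge
    · right
      have : ¬ pvIdent (t.getD r ' ') = true := fun hx => hr ⟨hlt, hx⟩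
      simpa [pvP] using this
    · left; omega
  | succ m ihm =>
    intro r hm
    rw [pvRightLoop]
    split_ifs with h
    · obtain ⟨ih1, ih2, ih3, ih4⟩ := ihm (r + 1) (by omega)
      refine ⟨by omega, fun _ => ih2 (by omega), ?_, fun _ => ih4 (by omega)⟩
      intro i hi1 hi2
      rcases Nat.lt_or_ge r i with hlt | hge
      · exact ih3 i (by omega) hi2
      · have : i = r := by omega
        subst this; exact h.2
    · refine ⟨Nat.le_refl r, fun hx => hx, fun i h1 h2 => by omega, fun hx => ?_⟩
      rcases Nat.lt_or_ge r t.length with hlt | hge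
      · right
        have : ¬ pvIdent (t.getD r ' ') = true := fun hc => h ⟨hlt, hc⟩
        simpa [pvP] using this
      · left; omega

lemma pvRightLoop_ge (t : List Char) (r : Nat) : r ≤ pvRightLoop t r :=
  (pvRightLoop_aux t _ r (Nat.le_refl _)).1

lemma pvRightLoop_le (t : List Char) (r : Nat) (h : r ≤ t.length) : pvRightLoop t r ≤ t.length :=
  (pvRightLoop_aux t _ r (Nat.le_refl _)).2.1 h

lemma pvRightLoop_all (t : List Char) (r : Nat) :
    ∀ i, r ≤ i → i < pvRightLoop t r → pvP t i = true :=
  (pvRightLoop_aux t _ r (Nat.le_refl _)).2.2.1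

lemma pvRightLoop_boundary (t : List Char) (r : Nat) (h : r ≤ t.length) :
    pvRightLoop t r = t.length ∨ pvP t (pvRightLoop t r) = false :=
  (pvRightLoop_aux t _ r (Nat.le_refl _)).2.2.2 h

-- a well-formed span containing n is exactly the run A's two loops delimit
lemma pvSpan_unique (t : List Char) (n : Nat) (hn : n < t.length) (hp : pvP t n = true)
    (s e : Nat) (hs : s ≤ n) (he : n < e) (hel : e ≤ t.length)
    (hall : ∀ i, s ≤ i → i < e → pvP t i = true)
    (hlb : s = 0 ∨ pvP t (s - 1) = false)
    (hrb : e = t.length ∨ pvP t e = false) :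
    s = pvLeftLoop t n ∧ e = pvRightLoop t (n + 1) := by
  have hLle := pvLeftLoop_le t n
  have hLall := pvLeftLoop_all t n
  have hLb := pvLeftLoop_boundary t n
  have hRge := pvRightLoop_ge t (n + 1)
  have hRle := pvRightLoop_le t (n + 1) (by omega)
  have hRall := pvRightLoop_all t (n + 1)
  have hRb := pvRightLoop_boundary t (n + 1) (by omega)
  set L := pvLeftLoop t n with hL
  set R := pvRightLoop t (n + 1) with hR
  constructor
  · rcases Nat.lt_trichotomy s L with hlt | heq | hgt
    · -- s < L: then L > 0 and t[L-1] is inside [s,e), so pvP (L-1) = true, contra boundary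
      have hpL : pvP t (L - 1) = true := hall (L - 1) (by omega) (by omega)
      rcases hLb with h0 | hf
      · omega
      · rw [hf] at hpL; exact absurd hpL (by simp)
    · exact heq
    · -- L < s: t[s-1] ∈ [L,n), so pvP (s-1) = true, contra span boundary
      have hpS : pvP t (s - 1) = true := by
        rcases Nat.lt_or_ge (s - 1) n with hlt | hge
        · exact hLall (s - 1) (by omega) hlt
        · have : s - 1 = n := by omega
          rw [this]; exact hp
      rcases hlb with h0 | hf
      · omega
      · rw [hf] at hpS; exact absurd hpS (by simp)
  · rcases Nat.lt_trichotomy e R with hlt | heq | hgt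
    · -- e < R: pvP e = true from right loop, contra span right boundary
      have hpE : pvP t e = true := hRall e (by omega) hlt
      rcases hrb with h0 | hf
      · omega
      · rw [hf] at hpE; exact absurd hpE (by simp)
    · exact heq
    · -- R < e: pvP R = true from span, contra loop boundary
      have hpR : pvP t R = true := hall R (by omega) (by omega)
      rcases hRb with h0 | hf
      · omega
      · rw [hf] at hpR; exact absurd hpR (by simp)

lemma pvFindSpan_tokens (t : List Char) (n : Nat) (hn : n ≤ t.length) :
    pvFindSpan (n : Int) (pvTokens t) =
      if n < t.length ∧ pvP t n = true
      then some ((pvLeftLoop t n : Int), (pvRightLoop t (n + 1) : Int)) else none := by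
  obtain ⟨hwf, hcovg⟩ := pvTokens_spec t
  split_ifs with h
  · obtain ⟨hlt, hp⟩ := h
    obtain ⟨se, hmem, hc1, hc2⟩ := hcovg n hlt hp
    have hsome := pvFindSpan_isSome (n : Int) (pvTokens t) se hmem hc1 hc2
    obtain ⟨se', hse'⟩ := Option.isSome_iff_exists.mp hsome
    rw [hse']
    obtain ⟨hm', h1', h2'⟩ := pvFindSpan_some _ _ _ hse'
    obtain ⟨s, e, heq, hse2, hel, hall, hlb, hrb⟩ := hwf se' hm'
    rw [heq] at h1' h2' ⊢
    simp only at h1' h2'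
    have hs : s ≤ n := by exact_mod_cast h1'
    have he : n < e := by exact_mod_cast h2'
    obtain ⟨hL, hR⟩ := pvSpan_unique t n hlt hp s e hs he hel hall hlb hrb
    rw [hL, hR]
  · cases hfnd : pvFindSpan (n : Int) (pvTokens t) with
    | none => rfl
    | some se =>
      obtain ⟨hm, h1, h2⟩ := pvFindSpan_some _ _ _ hfnd
      obtain ⟨s, e, heq, hse2, hel, hall, hlb, hrb⟩ := hwf se hm
      rw [heq] at h1 h2
      simp only at h1 h2
      have hs : s ≤ n := by exact_mod_cast h1
      have he : n < e := by exact_mod_cast h2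
      exact absurd ⟨by omega, hall n hs he⟩ h

lemma pvCore_eq (t : List Char) (column : Int) (h1 : 1 ≤ column)
    (h2 : column ≤ (t.length : Int) + 1) : pvACore t column = pvBCore t column := by
  simp only [pvACore, pvBCore]
  set n := (column - 1).toNat with hn
  have hnle : n ≤ t.length := by omega
  have hcoln : column.toNat = n + 1 := by omega
  rw [show column - 1 = (n : Int) from by omega]
  rw [pvFindSpan_tokens t n hnle]
  by_cases hcase : n < t.length ∧ pvP t n = true
  · rw [if_pos hcase]
    have hcl : column ≤ (t.length : Int) := by omega
    rw [if_pos hcl]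
    have hid : pvIdent (t.getD n ' ') = true := hcase.2
    rw [hid, hcoln]
    simp
  · rw [if_neg hcase]
    by_cases hcl : column ≤ (t.length : Int)
    · rw [if_pos hcl]
      have hplt : n < t.length := by omega
      have hpf : pvIdent (t.getD n ' ') = false := by
        cases hx : pvIdent (t.getD n ' ') with
        | false => rfl
        | true => exact absurd ⟨hplt, hx⟩ hcase
      rw [hpf]
      simp
    · rw [if_neg hcl]
      simp

-- ===== VERDICT (by name: the statement is the Claim_ definition above) =====
theorem get_symbol_at_position_py_spec : Claim_equal_get_symbol_at_position_py := by
  intro content line column language _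
  unfold Spec_get_symbol_at_position_py get_symbol_at_position_py get_symbol_at_position_py_alt
  simp only []
  split_ifs with h1 h2
  · rfl
  · rfl
  · rw [not_or] at h2
    exact pvCore_eq _ _ (by omega) (by omega)
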